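-- pv_equiv track=rewrite | github.com/Carmen-Carmen/coursera_bioinformatics | Bioinformatics_III_comparing_genes_proteins_and_genomes/week_5/week5.py | get_shared_k_mers
-- ===== SOURCE A (Python) =====
-- def get_shared_k_mers(strand1, strand2, k):
--     min_len = min(
--         len(strand1),
--         len(strand2)
--     )
--     if k > min_len:
--         return []
--
--     results = []
--
--     # O(n2), too slow
--     # for i in range(0, len(strand1) - k + 1):
--     #     k_mer1 = strand1[i : i + k]
--     #     for j in range(0, len(strand2) - k + 1):
--     #         k_mer2 = strand2[j : j + k]
--
--     #         if k_mer1 == k_mer2 or \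
--     #         k_mer1 == get_reverse_complement_DNA_strand(k_mer2):
--     #             results.append(
--     #                 (i, j)
--     #             )
--
--     # try use hashing to store k-mers in strand2
--     # O(n) time complexity
--     k_mer2_dict = {}
--     for j in range(0, len(strand2) - k + 1):
--         k_mer2 = strand2[j : j + k]
--         if k_mer2 in k_mer2_dict.keys():
--             k_mer2_dict[k_mer2].append(j)
--         else:
--             k_mer2_dict[k_mer2] = [j]
--     for i in range(0, len(strand1) - k + 1):
--         k_mer1 = strand1[i : i + k]
--         k_mer1_rev = get_reverse_complement_DNA_strand(k_mer1)
--         if k_mer1 in k_mer2_dict.keys():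
--             for j_pos in k_mer2_dict[k_mer1]:
--                 results.append((i, j_pos))
--         if k_mer1_rev in k_mer2_dict.keys():
--             for j_pos in k_mer2_dict[k_mer1_rev]:
--                 results.append((i, j_pos))
--
--     return results
--
-- def get_reverse_complement_DNA_strand(s):
--     l = len(s)
--     result = ""
--     for i in range(0, l):
--         base = s[i: i + 1]
--         if base == "A":
--             result += "T"
--         elif base == "T":
--             result += "A"
--         elif base == "C":
--             result += "G"
--         elif base == "G":
--             result += "C"
--
--     reversed_result = ""
--     for c in reversed(result):
--         reversed_result += c
--
--     return reversed_result
-- ===== SOURCE B (Python) =====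
-- def get_shared_k_mers(strand1, strand2, k):
--     min_len = min(
--         len(strand1),
--         len(strand2)
--     )
--     if k > min_len:
--         return []
--
--     results = []
--     for i in range(0, len(strand1) - k + 1):
--         k_mer1 = strand1[i : i + k]
--         k_mer1_rev = get_reverse_complement_DNA_strand(k_mer1)
--         for j in range(0, len(strand2) - k + 1):
--             if strand2[j : j + k] == k_mer1:
--                 results.append((i, j))
--         for j in range(0, len(strand2) - k + 1):
--             if strand2[j : j + k] == k_mer1_rev:
--                 results.append((i, j))
--     return results
--
-- def get_reverse_complement_DNA_strand(s):
--     l = len(s)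
--     result = ""
--     for i in range(0, l):
--         base = s[i: i + 1]
--         if base == "A":
--             result += "T"
--         elif base == "T":
--             result += "A"
--         elif base == "C":
--             result += "G"
--         elif base == "G":
--             result += "C"
--
--     reversed_result = ""
--     for c in reversed(result):
--         reversed_result += c
--
--     return reversed_result
-- ===== Notes on version B (the rewrite author's own statement) =====
-- stated objective: simpler
-- what changed: Replaced A's hash-index (dict grouping strand2 k-mer positions, then per-i lookups) by a direct nested brute-force scan: for each i, one inner pass over strand2 collects direct matches, a second inner pass collects reverse-complement matches, preserving A's output order exactly.
import Mathlib
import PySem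

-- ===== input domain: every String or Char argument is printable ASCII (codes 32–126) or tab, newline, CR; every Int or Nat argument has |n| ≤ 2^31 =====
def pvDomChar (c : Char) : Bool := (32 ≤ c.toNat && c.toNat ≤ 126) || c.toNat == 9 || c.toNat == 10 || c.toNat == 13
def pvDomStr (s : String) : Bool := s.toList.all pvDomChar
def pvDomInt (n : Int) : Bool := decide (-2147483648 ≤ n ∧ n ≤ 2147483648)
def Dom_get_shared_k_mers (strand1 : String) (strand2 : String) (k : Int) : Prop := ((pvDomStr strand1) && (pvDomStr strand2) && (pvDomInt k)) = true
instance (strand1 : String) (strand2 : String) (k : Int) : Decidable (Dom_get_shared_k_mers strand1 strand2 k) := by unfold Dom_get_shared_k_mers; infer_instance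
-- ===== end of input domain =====

-- B replaces A's dict of strand2 k-mer positions by a plain nested brute-force scan (simpler, not faster);
-- return values are identical, including ordering and the double count on reverse-complement palindromes.

-- ===== PORT A =====
-- shared helper: literal transliteration of get_reverse_complement_DNA_strand (identical in both sources)
def pyRevComp (s : List Char) : List Char :=
  let l : Int := PySem.List.len s
  let result : List Char :=
    (PySem.List.pyRange 0 l 1).foldl (fun acc i =>
      let base := PySem.List.slice s (some i) (some (i + 1))
      if base == ['A'] then acc ++ ['T']
      else if base == ['T'] then acc ++ ['A']
      else if base == ['C'] then acc ++ ['G']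
      else if base == ['G'] then acc ++ ['C']
      else acc) []
  result.reverse.foldl (fun acc c => acc ++ [c]) []

def get_shared_k_mers (strand1 : String) (strand2 : String) (k : Int) : List (Int × Int) :=
  let cs1 := strand1.toList
  let cs2 := strand2.toList
  let min_len : Int := min (PySem.List.len cs1) (PySem.List.len cs2)
  if k > min_len then []
  else
    -- build the dict: strand2 k-mer ↦ list of its positions j
    let d : PySem.Dict (List Char) (List Int) :=
      (PySem.List.pyRange 0 (PySem.List.len cs2 - k + 1) 1).foldl
        (fun d j =>
          let k_mer2 := PySem.List.slice cs2 (some j) (some (j + k))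
          if d.contains k_mer2 then d.modify k_mer2 [] (fun l => l ++ [j])
          else d.insert k_mer2 [j]) PySem.Dict.empty
    (PySem.List.pyRange 0 (PySem.List.len cs1 - k + 1) 1).foldl
      (fun results i =>
        let k_mer1 := PySem.List.slice cs1 (some i) (some (i + k))
        let k_mer1_rev := pyRevComp k_mer1
        let results :=
          if d.contains k_mer1 then
            (d.getD k_mer1 []).foldl (fun r j_pos => r ++ [(i, j_pos)]) results
          else results
        if d.contains k_mer1_rev then
          (d.getD k_mer1_rev []).foldl (fun r j_pos => r ++ [(i, j_pos)]) results
        else results) []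

-- ===== PORT B =====
def get_shared_k_mers_alt (strand1 : String) (strand2 : String) (k : Int) : List (Int × Int) :=
  let cs1 := strand1.toList
  let cs2 := strand2.toList
  let min_len : Int := min (PySem.List.len cs1) (PySem.List.len cs2)
  if k > min_len then []
  else
    (PySem.List.pyRange 0 (PySem.List.len cs1 - k + 1) 1).foldl
      (fun results i =>
        let k_mer1 := PySem.List.slice cs1 (some i) (some (i + k))
        let k_mer1_rev := pyRevComp k_mer1
        let results :=
          (PySem.List.pyRange 0 (PySem.List.len cs2 - k + 1) 1).foldl
            (fun r j => if PySem.List.slice cs2 (some j) (some (j + k)) == k_mer1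
                        then r ++ [(i, j)] else r) results
        (PySem.List.pyRange 0 (PySem.List.len cs2 - k + 1) 1).foldl
          (fun r j => if PySem.List.slice cs2 (some j) (some (j + k)) == k_mer1_rev
                      then r ++ [(i, j)] else r) results) []

-- ===== PRECONDITION & SPEC =====
def Spec_get_shared_k_mers (strand1 : String) (strand2 : String) (k : Int) (out : List (Int × Int)) : Prop := out = get_shared_k_mers_alt strand1 strand2 k
instance (strand1 : String) (strand2 : String) (k : Int) (out : List (Int × Int)) : Decidable (Spec_get_shared_k_mers strand1 strand2 k out) := by unfold Spec_get_shared_k_mers; infer_instance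

-- ===== CLAIM (what is proved, stated in full; the proofs are below) =====
def Claim_equal_get_shared_k_mers : Prop := ∀ (strand1 : String) (strand2 : String) (k : Int), Dom_get_shared_k_mers strand1 strand2 k → Spec_get_shared_k_mers strand1 strand2 k (get_shared_k_mers strand1 strand2 k)

-- ===== LEMMAS AND PROOFS =====

-- A's dict-building step IS Dict.modify with default []
lemma buildStep_eq_modify (d : PySem.Dict (List Char) (List Int)) (km : List Char) (j : Int) :
    (if d.contains km then d.modify km [] (fun l => l ++ [j]) else d.insert km [j])
      = d.modify km [] (fun l => l ++ [j]) := by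
  by_cases h : d.contains km = true
  · simp [h]
  · simp only [Bool.not_eq_true] at h
    simp [h, PySem.Dict.modify, PySem.Dict.getD_of_not_contains d ([] : List Int) h]

-- the value stored under any key c of A's dict is exactly the list of matching positions, in order
lemma build_getD (cs2 : List Char) (k : Int) (js : List Int) (c : List Char) :
    (js.foldl (fun d j =>
        d.modify (PySem.List.slice cs2 (some j) (some (j + k))) [] (fun l => l ++ [j]))
      PySem.Dict.empty).getD c []
      = js.filter (fun j => PySem.List.slice cs2 (some j) (some (j + k)) == c) := by
  have h := PySem.Dict.getD_foldl_modify_append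
      (js.map (fun j => (PySem.List.slice cs2 (some j) (some (j + k)), j)))
      (PySem.Dict.empty (κ := List Char) (ν := List Int)) c
  rw [List.foldl_map] at h
  simp only [h, List.filter_map, List.map_map]
  simp [Function.comp_def]

-- a key is absent from A's dict exactly when no position matches it
lemma build_contains (cs2 : List Char) (k : Int) (js : List Int) (c : List Char) :
    (js.foldl (fun d j =>
        d.modify (PySem.List.slice cs2 (some j) (some (j + k))) [] (fun l => l ++ [j]))
      PySem.Dict.empty).contains c = false →
    js.filter (fun j => PySem.List.slice cs2 (some j) (some (j + k)) == c) = [] := by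
  intro h
  have hk := PySem.Dict.keys_foldl_modify_key js
      (fun j => PySem.List.slice cs2 (some j) (some (j + k)))
      ([] : List Int) (fun _ j => fun l => l ++ [j])
      (PySem.Dict.empty (κ := List Char) (ν := List Int))
  have hmem : ¬ c ∈ js.map (fun j => PySem.List.slice cs2 (some j) (some (j + k))) := by
    intro hc
    have : (js.foldl (fun d j =>
        d.modify (PySem.List.slice cs2 (some j) (some (j + k))) [] (fun l => l ++ [j]))
      PySem.Dict.empty).contains c = true := by
      rw [PySem.Dict.contains_iff_mem_keys, hk]
      simpa [PySem.Set.update_empty, PySem.Set.mem_ofList] using hc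
    simp [this] at h
  rw [List.filter_eq_nil_iff]
  intro j hj
  simp only [List.mem_map, not_exists, not_and] at hmem
  simpa using hmem j hj

-- per key: A's guarded dict lookup produces exactly B's inner scan
lemma contrib_eq (cs2 : List Char) (k : Int) (js : List Int) (c : List Char) (i : Int)
    (res : List (Int × Int)) :
    (if (js.foldl (fun d j =>
          d.modify (PySem.List.slice cs2 (some j) (some (j + k))) [] (fun l => l ++ [j]))
        PySem.Dict.empty).contains c then
        ((js.foldl (fun d j =>
            d.modify (PySem.List.slice cs2 (some j) (some (j + k))) [] (fun l => l ++ [j]))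
          PySem.Dict.empty).getD c []).foldl (fun r j => r ++ [(i, j)]) res
      else res)
    = js.foldl (fun r j =>
        if PySem.List.slice cs2 (some j) (some (j + k)) == c then r ++ [(i, j)] else r) res := by
  rw [PySem.List.foldl_append_if (fun j => PySem.List.slice cs2 (some j) (some (j + k)) == c)
        (fun j => ((i : Int), j)) js res]
  by_cases h : (js.foldl (fun d j =>
          d.modify (PySem.List.slice cs2 (some j) (some (j + k))) [] (fun l => l ++ [j]))
        PySem.Dict.empty).contains c = true
  · simp only [h, if_pos]
    rw [build_getD, PySem.List.foldl_append_singleton_eq_map (fun j => ((i : Int), j))]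
  · simp only [Bool.not_eq_true] at h
    rw [build_contains cs2 k js c h]
    simp [h]

-- ===== VERDICT (by name: the statement is the Claim_ definition above) =====
theorem get_shared_k_mers_spec : Claim_equal_get_shared_k_mers := by
  intro strand1 strand2 k _
  unfold Spec_get_shared_k_mers get_shared_k_mers get_shared_k_mers_alt
  dsimp only
  split_ifs with hk
  · rfl
  · simp only [buildStep_eq_modify]
    apply PySem.List.foldl_congr_mem
    intro res i _
    dsimp only
    rw [contrib_eq, contrib_eq]
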